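-- pv_equiv track=rewrite | github.com/Ing-David/Projects | etudes_technique/projet.py | count_annotation
-- ===== SOURCE A (Python) =====
-- import operator
-- from collections import Counter
-- import operator
--
-- def count_annotation(list_tuple):
--     '''
--     function that count all the annotations from the output of entities linking function
--     '''
--     annotation_list =[]
--     #put in list for all annotations
--     for annotation in list_tuple:
--         annotation_list.append(annotation[0])
--     #merge annotations regardless of the capital letters
--     orig = Counter(annotation_list)
--     lower = Counter(map(str.lower, annotation_list))
--     merge_list = {}
--     for k_orig in orig:
--         k_lower = k_orig.lower()
--         if lower[k_lower] == orig[k_orig]: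
--             merge_list[k_orig] = orig[k_orig]
--         else:
--             merge_list[k_lower] = lower[k_lower]
--     #sort the annotations depends on how many times they appear in descending order
--     sorted_annotations = dict(sorted(merge_list.items(), key=operator.itemgetter(1),reverse=True) )
--
--     return sorted_annotations
-- ===== SOURCE B (Python) =====
-- def count_annotation(list_tuple):
--     '''
--     function that count all the annotations from the output of entities linking function
--     '''
--     # one grouping pass keyed by the lowercased annotation, tracking the sole
--     # original-case spelling (or None once a second spelling appears) and the total count
--     groups = {}
--     for annotation in list_tuple:
--         name = annotation[0]
--         key = name.lower()
--         if key in groups: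
--             spell, cnt = groups[key]
--             groups[key] = (spell if spell == name else None, cnt + 1)
--         else:
--             groups[key] = (name, 1)
--     merged = {}
--     for key, (spell, cnt) in groups.items():
--         merged[key if spell is None else spell] = cnt
--     return dict(sorted(merged.items(), key=lambda kv: kv[1], reverse=True))
-- ===== Notes on version B (the rewrite author's own statement) =====
-- stated objective: alternative
-- what changed: A builds two Counters (original-case and lowercased) and merges them by comparing counts per distinct key; B does one grouping pass over the input keyed by the lowercased annotation, tracking the total count and the sole original-case spelling (or None once a second spelling appears), then reads the merged key directly from that state.
import Mathlib
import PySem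

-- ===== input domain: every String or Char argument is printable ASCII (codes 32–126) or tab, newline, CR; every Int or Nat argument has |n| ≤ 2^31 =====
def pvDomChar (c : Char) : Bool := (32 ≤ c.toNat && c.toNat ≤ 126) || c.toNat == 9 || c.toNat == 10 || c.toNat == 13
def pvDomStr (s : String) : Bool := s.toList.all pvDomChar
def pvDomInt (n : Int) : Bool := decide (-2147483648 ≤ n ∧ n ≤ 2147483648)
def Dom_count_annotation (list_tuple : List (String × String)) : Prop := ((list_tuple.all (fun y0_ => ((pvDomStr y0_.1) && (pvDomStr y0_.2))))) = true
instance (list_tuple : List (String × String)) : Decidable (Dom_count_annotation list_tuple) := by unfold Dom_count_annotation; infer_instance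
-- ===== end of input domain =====

-- B replaces A's two Counters plus per-key comparison merge by one grouping pass that
-- tracks, per lowercased key, the total count and the sole original-case spelling (or
-- None once a second spelling appears); same return value (objective: alternative).

-- ===== PORT A =====
def count_annotation (list_tuple : List (String × String)) : List (String × Int) :=
  let annotation_list := list_tuple.foldl (fun acc annotation => acc ++ [annotation.1]) []
  let orig := PySem.Dict.counter annotation_list
  let lower := PySem.Dict.counter (annotation_list.map PySem.Str.lower)
  let merge_list := orig.keys.foldl (fun m k_orig =>
    let k_lower := PySem.Str.lower k_orig
    if lower.getD k_lower 0 == orig.getD k_orig 0 then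
      m.insert k_orig (orig.getD k_orig 0)
    else
      m.insert k_lower (lower.getD k_lower 0)) PySem.Dict.empty
  (PySem.Dict.ofList (PySem.List.sorted merge_list.items (fun p => p.2) true)).items

-- ===== PORT B =====
def count_annotation_alt (list_tuple : List (String × String)) : List (String × Int) :=
  let groups : PySem.Dict String (Option String × Int) := list_tuple.foldl (fun g annotation =>
    let name := annotation.1
    let key := PySem.Str.lower name
    if g.contains key then
      let p := g.getD key (none, 0)
      g.insert key ((if p.1 == some name then p.1 else none), p.2 + 1)
    else
      g.insert key (some name, 1)) PySem.Dict.empty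
  let merged := groups.items.foldl (fun m kv =>
    m.insert (match kv.2.1 with | none => kv.1 | some s => s) kv.2.2)
    (PySem.Dict.empty : PySem.Dict String Int)
  (PySem.Dict.ofList (PySem.List.sorted merged.items (fun p => p.2) true)).items

-- ===== PRECONDITION & SPEC =====
def Spec_count_annotation (list_tuple : List (String × String)) (out : List (String × Int)) : Prop := out = count_annotation_alt list_tuple
instance (list_tuple : List (String × String)) (out : List (String × Int)) : Decidable (Spec_count_annotation list_tuple out) := by unfold Spec_count_annotation; infer_instance

-- ===== CLAIM (what is proved, stated in full; the proofs are below) =====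
def Claim_equal_count_annotation : Prop := ∀ (list_tuple : List (String × String)), Dom_count_annotation list_tuple → Spec_count_annotation list_tuple (count_annotation list_tuple)

-- ===== LEMMAS AND PROOFS =====

-- abbreviations used only by the proofs
def pvLow (s : String) : String := PySem.Str.lower s

-- distinct original spellings of lowercase class l, in first-appearance order
def pvVariants (xs : List String) (l : String) : List String :=
  PySem.List.dedup (xs.filter (fun s => pvLow s == l))

-- the merged key A and B both end up using for class l
def pvKeyOf (xs : List String) (l : String) : String :=
  match pvVariants xs l with
  | [s] => s
  | _ => l

-- the sole original spelling of class l, if there is exactly one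
def pvSpellOf (xs : List String) (l : String) : Option String :=
  match pvVariants xs l with
  | [s] => some s
  | _ => none

def pvCnt (xs : List String) (l : String) : Int := ((xs.map pvLow).count l : Int)

def pvG (xs : List String) (l : String) : String × Int := (pvKeyOf xs l, pvCnt xs l)

def pvF (xs : List String) (l : String) : String × (Option String × Int) :=
  (l, (pvSpellOf xs l, pvCnt xs l))

-- the common reference value of both programs' merge dictionaries' item lists
def pvRef (xs : List String) : List (String × Int) :=
  (PySem.List.dedup (xs.map pvLow)).map (pvG xs)

-- A's whole computation, with the first loop already replaced by List.map
def pvAfull (xs : List String) : List (String × Int) :=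
  (PySem.Dict.ofList (PySem.List.sorted
    ((PySem.Dict.counter xs).keys.foldl (fun m k_orig =>
      if (PySem.Dict.counter (xs.map PySem.Str.lower)).getD (PySem.Str.lower k_orig) 0
          == (PySem.Dict.counter xs).getD k_orig 0 then
        m.insert k_orig ((PySem.Dict.counter xs).getD k_orig 0)
      else
        m.insert (PySem.Str.lower k_orig)
          ((PySem.Dict.counter (xs.map PySem.Str.lower)).getD (PySem.Str.lower k_orig) 0))
      PySem.Dict.empty).items
    (fun p => p.2) true)).items

-- B's grouping-loop body, named
def pvBStep (g : PySem.Dict String (Option String × Int)) (name : String) :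
    PySem.Dict String (Option String × Int) :=
  if g.contains (PySem.Str.lower name) then
    g.insert (PySem.Str.lower name)
      ((if (g.getD (PySem.Str.lower name) (none, 0)).1 == some name
        then (g.getD (PySem.Str.lower name) (none, 0)).1 else none),
       (g.getD (PySem.Str.lower name) (none, 0)).2 + 1)
  else
    g.insert (PySem.Str.lower name) (some name, 1)

theorem lowerChar_idem (c : Char) : PySem.Chars.lowerChar (PySem.Chars.lowerChar c) = PySem.Chars.lowerChar c := by
  unfold PySem.Chars.lowerChar PySem.Chars.isupper
  split_ifs with h1 h2 <;> try rfl
  exfalso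
  simp only [Bool.and_eq_true, decide_eq_true_eq, Char.le_def, UInt32.le_iff_toNat_le] at h1 h2
  change 65 ≤ c.toNat ∧ c.toNat ≤ 90 at h1
  have hv : (Char.ofNat (c.toNat + 32)).toNat = c.toNat + 32 := by
    rw [Char.toNat_ofNat, if_pos]
    left; omega
  change 65 ≤ (Char.ofNat (c.toNat + 32)).toNat ∧ (Char.ofNat (c.toNat + 32)).toNat ≤ 90 at h2
  omega

theorem pvLow_idem (s : String) : pvLow (pvLow s) = pvLow s := by
  unfold pvLow
  rw [← String.toList_inj]
  simp [PySem.Str.toList_lower, PySem.Chars.lower, List.map_map, Function.comp, lowerChar_idem]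

theorem pvMemVariants (xs : List String) (l a : String) (h : a ∈ pvVariants xs l) : pvLow a = l := by
  unfold pvVariants at h
  rw [PySem.List.mem_dedup] at h
  exact eq_of_beq (List.mem_filter.mp h).2

theorem pvLow_keyOf (xs : List String) (l : String) (hl : l ∈ xs.map pvLow) :
    pvLow (pvKeyOf xs l) = l := by
  have hll : pvLow l = l := by
    obtain ⟨s, hs, rfl⟩ := List.mem_map.mp hl
    exact pvLow_idem s
  unfold pvKeyOf
  rcases hv : pvVariants xs l with _ | ⟨a, _ | ⟨b, t⟩⟩
  · exact hll
  · exact pvMemVariants xs l a (hv ▸ List.mem_singleton_self a)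
  · exact hll

-- generic: a fold of key-distinct inserts lists the deduped images in order
theorem pvFoldInsertItems {α κ ν : Type} [BEq α] [LawfulBEq α] [BEq κ] [LawfulBEq κ]
    (f : α → κ × ν) (ls : List α)
    (hinj : ∀ l ∈ ls, ∀ l' ∈ ls, (f l).1 = (f l').1 → l = l') :
    (ls.foldl (fun m l => m.insert (f l).1 (f l).2) PySem.Dict.empty).items
      = (PySem.List.dedup ls).map f := by
  simp only [PySem.List.dedup_eq_ofList]
  induction ls using List.reverseRecOn with
  | nil => rfl
  | append_singleton xs x ih =>
    have hsub : ∀ l ∈ xs, ∀ l' ∈ xs, (f l).1 = (f l').1 → l = l' := by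
      intro l hl l' hl' h
      exact hinj l (List.mem_append_left _ hl) l' (List.mem_append_left _ hl') h
    have ih' := ih hsub
    rw [List.foldl_append, List.foldl_cons, List.foldl_nil, PySem.Set.ofList_append_singleton]
    set d := xs.foldl (fun m l => m.insert (f l).1 (f l).2) PySem.Dict.empty with hd
    have hkeys : d.keys = ((PySem.Set.ofList xs).map f).map Prod.fst := by
      simp only [PySem.Dict.keys, ih']
    by_cases hx : x ∈ xs
    · have hcont : d.contains (f x).1 = true := by
        rw [PySem.Dict.contains_iff_mem_keys, hkeys]
        exact List.mem_map_of_mem (List.mem_map_of_mem ((PySem.Set.mem_ofList xs x).mpr hx))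
      rw [PySem.Dict.items_insert_of_contains d (f x).2 hcont, ih',
          PySem.Set.add_of_mem ((PySem.Set.mem_ofList xs x).mpr hx)]
      rw [List.map_map]
      apply List.map_congr_left
      intro l hl
      have hlxs : l ∈ xs := (PySem.Set.mem_ofList xs l).mp hl
      by_cases he : ((f l).1 == (f x).1) = true
      · have hlx : l = x := hinj l (List.mem_append_left _ hlxs) x (List.mem_append_right _ (List.mem_singleton_self x)) (eq_of_beq he)
        subst hlx
        simp [Function.comp]
      · simp [Function.comp, he]
    · have hcont : d.contains (f x).1 = false := by
        rw [← Bool.not_eq_true, PySem.Dict.contains_iff_mem_keys, hkeys]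
        intro hmem
        obtain ⟨p, hp, hp1⟩ := List.mem_map.mp hmem
        obtain ⟨l, hl, rfl⟩ := List.mem_map.mp hp
        have hlxs : l ∈ xs := (PySem.Set.mem_ofList xs l).mp hl
        have : x = l := hinj x (List.mem_append_right _ (List.mem_singleton_self x)) l (List.mem_append_left _ hlxs) hp1.symm
        exact hx (this ▸ hlxs)
      rw [PySem.Dict.items_insert_of_not_contains d (f x).2 hcont, ih',
          PySem.Set.add_of_not_mem (fun h => hx ((PySem.Set.mem_ofList xs x).mp h)),
          List.map_append]
      rfl

theorem pvDedupMapDedup {α β : Type} [BEq α] [LawfulBEq α] [BEq β] [LawfulBEq β]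
    (f : α → β) (xs : List α) :
    PySem.List.dedup ((PySem.List.dedup xs).map f) = PySem.List.dedup (xs.map f) := by
  simp only [PySem.List.dedup_eq_ofList]
  induction xs using List.reverseRecOn with
  | nil => rfl
  | append_singleton xs x ih =>
    rw [PySem.Set.ofList_append_singleton, List.map_append, List.map_singleton,
        PySem.Set.ofList_append_singleton]
    by_cases hx : x ∈ xs
    · rw [PySem.Set.add_of_mem ((PySem.Set.mem_ofList xs x).mpr hx)]
      rw [ih, PySem.Set.add_of_mem]
      rw [PySem.Set.mem_ofList]
      exact List.mem_map_of_mem hx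
    · rw [PySem.Set.add_of_not_mem (fun h => hx ((PySem.Set.mem_ofList xs x).mp h)),
          List.map_append, List.map_singleton, PySem.Set.ofList_append_singleton, ih]

theorem pvOfListConst {α : Type} [BEq α] [LawfulBEq α] (G : List α) (k : α)
    (hall : ∀ b ∈ G, b = k) : PySem.Set.ofList G = if G = [] then [] else [k] := by
  induction G with
  | nil => rfl
  | cons x G' ih =>
    have hx : x = k := hall x List.mem_cons_self
    subst hx
    have ih' := ih (fun b hb => hall b (List.mem_cons_of_mem _ hb))
    rw [PySem.Set.ofList_cons, ih']
    have hnil : PySem.Set.discard (if G' = [] then [] else [x]) x = [] := by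
      apply List.eq_nil_iff_forall_not_mem.mpr
      intro y hy
      rcases (PySem.Set.mem_discard _ _ _).mp hy with ⟨hy1, hy2⟩
      split at hy1
      · exact List.not_mem_nil hy1
      · exact hy2 (List.mem_singleton.mp hy1)
    rw [hnil]
    simp

theorem pvCountMapLow (xs : List String) (l : String) :
    (xs.map pvLow).count l = (xs.filter (fun s => pvLow s == l)).length := by
  rw [List.count_eq_countP, List.countP_map, List.countP_eq_length_filter]
  rfl

-- A's loop body for a key k of the counter is the reference insert for class lower(k)
theorem pvAstep (xs : List String) (k : String) (hk : k ∈ xs)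
    (m : PySem.Dict String Int) :
    (if ((PySem.Dict.counter (xs.map PySem.Str.lower)).getD (PySem.Str.lower k) 0
          == (PySem.Dict.counter xs).getD k 0) = true then
      m.insert k ((PySem.Dict.counter xs).getD k 0)
    else
      m.insert (PySem.Str.lower k) ((PySem.Dict.counter (xs.map PySem.Str.lower)).getD (PySem.Str.lower k) 0))
    = m.insert (pvG xs (pvLow k)).1 (pvG xs (pvLow k)).2 := by
  have hmap : xs.map PySem.Str.lower = xs.map pvLow := rfl
  rw [hmap, PySem.Dict.getD_counter, PySem.Dict.getD_counter]
  set l := pvLow k with hl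
  have hlk : PySem.Str.lower k = l := rfl
  rw [hlk]
  set G := xs.filter (fun s => pvLow s == l) with hG
  have hkG : k ∈ G := List.mem_filter.mpr ⟨hk, by simp [hl]⟩
  have hc1 : G.count k = xs.count k := List.count_filter (by simp [hl])
  have hc2 : (xs.map pvLow).count l = G.length := pvCountMapLow xs l
  by_cases hcond : (xs.map pvLow).count l = xs.count k
  · rw [if_pos (by exact_mod_cast beq_iff_eq.mpr (by exact_mod_cast hcond))]
    have hall : ∀ b ∈ G, k = b := by
      apply List.count_eq_length.mp
      have := List.count_le_length (a := k) (l := G)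
      omega
    have hvar : pvVariants xs l = [k] := by
      unfold pvVariants
      rw [PySem.List.dedup_eq_ofList, ← hG, pvOfListConst G k (fun b hb => (hall b hb).symm)]
      rw [if_neg (List.ne_nil_of_mem hkG)]
    have hkey : pvKeyOf xs l = k := by unfold pvKeyOf; rw [hvar]
    simp only [pvG, hkey, pvCnt, hcond]
  · rw [if_neg (by simpa using fun h => hcond (by exact_mod_cast h))]
    have hnall : ¬ ∀ b ∈ G, k = b := by
      intro hall
      exact hcond (by rw [hc2, ← hc1, List.count_eq_length.mpr hall])
    push Not at hnall
    obtain ⟨b, hbG, hbk⟩ := hnall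
    have hkv : k ∈ pvVariants xs l := by
      unfold pvVariants; rw [PySem.List.mem_dedup]; exact hkG
    have hbv : b ∈ pvVariants xs l := by
      unfold pvVariants; rw [PySem.List.mem_dedup]; exact hbG
    have hkey : pvKeyOf xs l = l := by
      unfold pvKeyOf
      rcases hv : pvVariants xs l with _ | ⟨a, _ | ⟨c, t⟩⟩
      · rfl
      · exfalso
        rw [hv] at hkv hbv
        exact hbk ((List.mem_singleton.mp hkv).trans (List.mem_singleton.mp hbv).symm)
      · rfl
    simp only [pvG, hkey, pvCnt]

-- A's merge dictionary lists exactly the reference items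
theorem pvA_merge (xs : List String) :
    ((PySem.Dict.counter xs).keys.foldl (fun m k_orig =>
      if (PySem.Dict.counter (xs.map PySem.Str.lower)).getD (PySem.Str.lower k_orig) 0
          == (PySem.Dict.counter xs).getD k_orig 0 then
        m.insert k_orig ((PySem.Dict.counter xs).getD k_orig 0)
      else
        m.insert (PySem.Str.lower k_orig)
          ((PySem.Dict.counter (xs.map PySem.Str.lower)).getD (PySem.Str.lower k_orig) 0))
      PySem.Dict.empty).items = pvRef xs := by
  rw [PySem.Dict.keys_counter]
  rw [PySem.List.foldl_congr_mem (PySem.Set.ofList xs) _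
      (fun m k => m.insert (pvG xs (pvLow k)).1 (pvG xs (pvLow k)).2) PySem.Dict.empty
      (fun m k hkm => pvAstep xs k ((PySem.Set.mem_ofList xs k).mp hkm) m)]
  rw [← List.foldl_map (f := pvLow)
      (g := fun (m : PySem.Dict String Int) l => m.insert (pvG xs l).1 (pvG xs l).2)]
  rw [pvFoldInsertItems (pvG xs) ((PySem.Set.ofList xs).map pvLow) ?hinj]
  · rw [← PySem.List.dedup_eq_ofList xs, pvDedupMapDedup, pvRef]
  case hinj =>
    intro l hl l' hl' h
    have hml : l ∈ xs.map pvLow := by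
      obtain ⟨k, hk, rfl⟩ := List.mem_map.mp hl
      exact List.mem_map_of_mem ((PySem.Set.mem_ofList xs k).mp hk)
    have hml' : l' ∈ xs.map pvLow := by
      obtain ⟨k, hk, rfl⟩ := List.mem_map.mp hl'
      exact List.mem_map_of_mem ((PySem.Set.mem_ofList xs k).mp hk)
    rw [← pvLow_keyOf xs l hml, ← pvLow_keyOf xs l' hml']
    exact congrArg pvLow h

-- appending an element of another lowercase class changes nothing
theorem pvVariants_append_ne (xs : List String) (x : String) (l : String) (h : l ≠ pvLow x) :
    pvVariants (xs ++ [x]) l = pvVariants xs l := by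
  unfold pvVariants
  rw [List.filter_append]
  have hnil : [x].filter (fun s => pvLow s == l) = [] := by
    simp [beq_iff_eq]
    exact fun hc => h hc.symm
  rw [hnil, List.append_nil]

theorem pvCnt_append_ne (xs : List String) (x : String) (l : String) (h : l ≠ pvLow x) :
    pvCnt (xs ++ [x]) l = pvCnt xs l := by
  unfold pvCnt
  rw [List.map_append, List.count_append]
  simp [List.count_singleton, beq_iff_eq]
  intro hc
  exact absurd hc.symm h

theorem pvCnt_append_self (xs : List String) (x : String) :
    pvCnt (xs ++ [x]) (pvLow x) = pvCnt xs (pvLow x) + 1 := by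
  unfold pvCnt
  rw [List.map_append, List.count_append]
  simp

theorem pvVariants_append_self (xs : List String) (x : String) :
    pvVariants (xs ++ [x]) (pvLow x) = PySem.Set.add (pvVariants xs (pvLow x)) x := by
  unfold pvVariants
  rw [List.filter_append]
  have hone : [x].filter (fun s => pvLow s == (pvLow x)) = [x] := by simp
  rw [hone, PySem.List.dedup_eq_ofList, PySem.List.dedup_eq_ofList,
      PySem.Set.ofList_append_singleton]

theorem pvSpellOf_append_ne (xs : List String) (x : String) (l : String) (h : l ≠ pvLow x) :
    pvSpellOf (xs ++ [x]) l = pvSpellOf xs l := by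
  unfold pvSpellOf
  rw [pvVariants_append_ne xs x l h]

-- fresh lowercase class: the new element is its sole variant
theorem pvSpellOf_fresh (xs : List String) (x : String) (h : pvLow x ∉ xs.map pvLow) :
    pvSpellOf (xs ++ [x]) (pvLow x) = some x ∧ pvCnt (xs ++ [x]) (pvLow x) = 1 := by
  have hfe : xs.filter (fun s => pvLow s == pvLow x) = [] := by
    apply List.filter_eq_nil_iff.mpr
    intro s hs hc
    exact h (List.mem_map.mpr ⟨s, hs, eq_of_beq hc⟩)
  constructor
  · unfold pvSpellOf
    rw [pvVariants_append_self]
    unfold pvVariants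
    rw [hfe]
    rfl
  · rw [pvCnt_append_self]
    unfold pvCnt
    rw [List.count_eq_countP, List.countP_map, List.countP_eq_length_filter]
    rw [show (List.filter ((fun b => b == pvLow x) ∘ pvLow) xs) = [] from hfe]
    rfl

-- existing lowercase class: the sole spelling survives iff it equals the new element
theorem pvSpellOf_step (xs : List String) (x : String) (h : pvLow x ∈ xs.map pvLow) :
    pvSpellOf (xs ++ [x]) (pvLow x)
      = (if pvSpellOf xs (pvLow x) == some x then pvSpellOf xs (pvLow x) else none) := by
  have hne : pvVariants xs (pvLow x) ≠ [] := by
    obtain ⟨s, hs, hsl⟩ := List.mem_map.mp h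
    intro hnil
    have hsv : s ∈ pvVariants xs (pvLow x) := by
      unfold pvVariants
      rw [PySem.List.mem_dedup]
      exact List.mem_filter.mpr ⟨hs, beq_iff_eq.mpr hsl⟩
    rw [hnil] at hsv
    exact List.not_mem_nil hsv
  unfold pvSpellOf
  rw [pvVariants_append_self]
  rcases hv : pvVariants xs (pvLow x) with _ | ⟨a, _ | ⟨b, t⟩⟩
  · exact absurd hv hne
  · rw [PySem.Set.add_eq_ite]
    by_cases hxa : x = a
    · subst hxa
      simp
    · rw [if_neg (by simp [hxa])]
      simp
      intro hc
      exact absurd hc.symm hxa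
  · rw [PySem.Set.add_eq_ite]
    by_cases hm : x ∈ a :: b :: t
    · rw [if_pos hm]
      rfl
    · rw [if_neg hm, List.cons_append, List.cons_append]
      rfl

-- B's grouping dictionary after the first pass
theorem pvB_groups (xs : List String) :
    (xs.foldl pvBStep PySem.Dict.empty).items
    = (PySem.List.dedup (xs.map pvLow)).map (pvF xs) := by
  induction xs using List.reverseRecOn with
  | nil => rfl
  | append_singleton xs x ih =>
    rw [List.foldl_append, List.foldl_cons, List.foldl_nil]
    set g := xs.foldl pvBStep PySem.Dict.empty with hgdef
    set D := PySem.List.dedup (xs.map pvLow) with hD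
    have hlx : PySem.Str.lower x = pvLow x := rfl
    have hkeys : g.keys = D := by
      rw [show g.keys = g.items.map Prod.fst from rfl, ih, List.map_map]
      show List.map (fun l => (pvF xs l).1) D = D
      simp [pvF]
    have hnd : g.keys.Nodup := by
      rw [hkeys, hD, PySem.List.dedup_eq_ofList]
      exact PySem.Set.nodup_ofList _
    rw [List.map_append]
    unfold pvBStep
    by_cases hmem : pvLow x ∈ xs.map pvLow
    · have hmD : pvLow x ∈ D := by rw [hD, PySem.List.mem_dedup]; exact hmem
      have hcont : g.contains (PySem.Str.lower x) = true := by
        rw [hlx, PySem.Dict.contains_iff_mem_keys, hkeys]; exact hmD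
      rw [if_pos hcont]
      have hitem : (pvLow x, (pvSpellOf xs (pvLow x), pvCnt xs (pvLow x))) ∈ g.items := by
        rw [ih]; exact List.mem_map_of_mem hmD
      have hget : g.getD (PySem.Str.lower x) (none, 0) = (pvSpellOf xs (pvLow x), pvCnt xs (pvLow x)) := by
        rw [hlx]; exact PySem.Dict.getD_of_mem_items g hitem hnd _
      rw [hget]
      rw [PySem.Dict.items_insert_of_contains g _ hcont, ih]
      have hDnew : PySem.List.dedup (xs.map pvLow ++ [pvLow x]) = D := by
        rw [PySem.List.dedup_eq_ofList, PySem.Set.ofList_append_singleton,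
            PySem.Set.add_of_mem (by rw [PySem.Set.mem_ofList]; exact hmem), hD,
            PySem.List.dedup_eq_ofList]
      rw [show List.map pvLow [x] = [pvLow x] from rfl, hDnew, List.map_map]
      apply List.map_congr_left
      intro l hl
      by_cases hll : l = pvLow x
      · subst hll
        simp only [Function.comp, pvF, hlx, beq_self_eq_true, if_pos]
        rw [pvSpellOf_step xs x hmem, pvCnt_append_self]
      · have hbeq : (((pvF xs l).1 == PySem.Str.lower x)) = false := by
          simp [pvF, hlx]
          exact hll
        simp only [Function.comp_apply, hbeq, Bool.false_eq_true, if_false]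
        unfold pvF
        rw [pvSpellOf_append_ne xs x l hll, pvCnt_append_ne xs x l hll]
    · have hcont : g.contains (PySem.Str.lower x) = false := by
        rw [← Bool.not_eq_true, hlx, PySem.Dict.contains_iff_mem_keys, hkeys]
        intro hc
        exact hmem (by rw [hD, PySem.List.mem_dedup] at hc; exact hc)
      rw [if_neg (by rw [hcont]; exact Bool.false_ne_true)]
      rw [PySem.Dict.items_insert_of_not_contains g _ hcont, ih]
      have hDnew : PySem.List.dedup (xs.map pvLow ++ [pvLow x]) = D ++ [pvLow x] := by
        rw [PySem.List.dedup_eq_ofList, PySem.Set.ofList_append_singleton,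
            PySem.Set.add_of_not_mem (by rw [PySem.Set.mem_ofList]; exact hmem), hD,
            PySem.List.dedup_eq_ofList]
      rw [show List.map pvLow [x] = [pvLow x] from rfl, hDnew, List.map_append]
      congr 1
      · apply List.map_congr_left
        intro l hl
        have hll : l ≠ pvLow x := by
          intro h
          exact hmem (by rw [← h]; rw [hD, PySem.List.mem_dedup] at hl; exact hl)
        unfold pvF
        rw [pvSpellOf_append_ne xs x l hll, pvCnt_append_ne xs x l hll]
      · obtain ⟨h1, h2⟩ := pvSpellOf_fresh xs x hmem
        simp only [List.map_singleton, pvF, hlx, h1, h2]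

-- the merged key read off the group state is the reference key
theorem pvKey_from_spell (xs : List String) (l : String) :
    (match pvSpellOf xs l with | none => l | some s => s) = pvKeyOf xs l := by
  rcases hv : pvVariants xs l with _ | ⟨a, _ | ⟨b, t⟩⟩ <;> simp [pvSpellOf, pvKeyOf, hv]

-- B's merge dictionary lists exactly the reference items
theorem pvB_merge (xs : List String) :
    (((PySem.List.dedup (xs.map pvLow)).map (pvF xs)).foldl
      (fun m kv => m.insert (match kv.2.1 with | none => kv.1 | some s => s) kv.2.2)
      (PySem.Dict.empty : PySem.Dict String Int)).items = pvRef xs := by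
  rw [List.foldl_map]
  have hcong := PySem.List.foldl_congr_mem (PySem.List.dedup (xs.map pvLow))
    (fun (m : PySem.Dict String Int) l =>
      m.insert (match (pvF xs l).2.1 with | none => (pvF xs l).1 | some s => s) (pvF xs l).2.2)
    (fun (m : PySem.Dict String Int) l => m.insert (pvG xs l).1 (pvG xs l).2)
    PySem.Dict.empty
    (by
      intro m l hl
      show m.insert (match pvSpellOf xs l with | none => l | some s => s) (pvCnt xs l) = _
      rw [pvKey_from_spell]
      rfl)
  rw [hcong]
  rw [pvFoldInsertItems (pvG xs) (PySem.List.dedup (xs.map pvLow)) ?hinj]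
  · rw [show PySem.List.dedup (PySem.List.dedup (xs.map pvLow)) = PySem.List.dedup (xs.map pvLow) by
      rw [PySem.List.dedup_eq_ofList (xs.map pvLow), PySem.List.dedup_eq_ofList,
          PySem.Set.ofList_ofList]]
    rfl
  case hinj =>
    intro l hl l' hl' h
    rw [PySem.List.mem_dedup] at hl hl'
    rw [← pvLow_keyOf xs l hl, ← pvLow_keyOf xs l' hl']
    exact congrArg pvLow h

-- ===== VERDICT (by name: the statement is the Claim_ definition above) =====
theorem count_annotation_spec : Claim_equal_count_annotation := by
  intro list_tuple _
  show count_annotation list_tuple = count_annotation_alt list_tuple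
  have hA : count_annotation list_tuple
      = pvAfull (list_tuple.foldl (fun acc annotation => acc ++ [annotation.1]) []) := rfl
  have hB : count_annotation_alt list_tuple
      = (PySem.Dict.ofList (PySem.List.sorted
          ((list_tuple.foldl (fun g annotation => pvBStep g annotation.1) PySem.Dict.empty).items.foldl
            (fun m kv => m.insert (match kv.2.1 with | none => kv.1 | some s => s) kv.2.2)
            (PySem.Dict.empty : PySem.Dict String Int)).items
          (fun p => p.2) true)).items := rfl
  rw [hA, hB, PySem.List.foldl_append_singleton_eq_map, List.nil_append]
  rw [← List.foldl_map (f := fun (annotation : String × String) => annotation.1) (g := pvBStep)]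
  unfold pvAfull
  rw [pvA_merge, pvB_groups, pvB_merge]
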